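-- pv_equiv track=rewrite | github.com/ssafycodingstudy/StudyPython | Yujin/프로그래머스/42626.py | solution
-- ===== SOURCE A (Python) =====
-- import heapq
--
-- def solution(scoville, K):
--     answer = 0
--     heapq.heapify(scoville)
--
--     while len(scoville) > 1:
--         if scoville[0] >= K:
--             return answer
--         food = heapq.heappop(scoville) + heapq.heappop(scoville)*2
--         heapq.heappush(scoville, food)
--         answer += 1
--
--     if scoville[0] < K:
--         return -1
--     else:
--         return answer
-- ===== SOURCE B (Python) =====
-- def _front(base, i, mixed, j):
--     # smallest remaining value: compare the two queue fronts
--     if j == len(mixed) or (i < len(base) and base[i] <= mixed[j]):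
--         return base[i]
--     return mixed[j]
--
-- def _take(base, i, mixed, j):
--     # pop the smallest remaining value, advancing the right front pointer
--     if j == len(mixed) or (i < len(base) and base[i] <= mixed[j]):
--         return base[i], i + 1, j
--     return mixed[j], i, j + 1
--
-- def solution(scoville, K):
--     base = sorted(scoville)      # original values, consumed from the front
--     mixed = []                   # produced foods, in nondecreasing order (FIFO)
--     i = j = 0
--     answer = 0
--     while (len(base) - i) + (len(mixed) - j) > 1:
--         if _front(base, i, mixed, j) >= K:
--             return answer
--         a, i, j = _take(base, i, mixed, j)
--         b, i, j = _take(base, i, mixed, j)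
--         mixed.append(a + 2 * b)
--         answer += 1
--     return -1 if _front(base, i, mixed, j) < K else answer
-- ===== Notes on version B (the rewrite author's own statement) =====
-- stated objective: alternative
-- what changed: Replaces the priority queue entirely by the two-queue merge technique: sort once, keep produced foods in a FIFO queue (they come out in nondecreasing order), so the two smallest remaining values are always found at the two queue fronts in O(1) with no heap, no re-insertion and no re-sorting.
import Mathlib
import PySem

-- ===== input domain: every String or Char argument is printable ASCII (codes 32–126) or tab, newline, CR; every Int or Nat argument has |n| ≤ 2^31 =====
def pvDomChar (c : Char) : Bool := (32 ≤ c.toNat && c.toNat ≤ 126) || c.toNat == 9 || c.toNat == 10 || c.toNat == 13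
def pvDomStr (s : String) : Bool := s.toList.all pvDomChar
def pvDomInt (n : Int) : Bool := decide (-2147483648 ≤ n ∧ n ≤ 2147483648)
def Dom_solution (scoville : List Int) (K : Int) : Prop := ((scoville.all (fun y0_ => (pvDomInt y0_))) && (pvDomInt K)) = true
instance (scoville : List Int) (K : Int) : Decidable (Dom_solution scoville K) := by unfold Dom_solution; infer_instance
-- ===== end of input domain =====

-- B drops the heap for the two-queue merge technique (sort once; produced foods are consumed
-- from a FIFO queue, the two minima are always at the queue fronts); return-value equivalence
-- only: A heapifies `scoville` in place, B does not mutate it.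

-- ===== PORT A =====
-- heapq on Int values: heapify makes scoville[0] the minimum; heappop returns the minimum and
-- leaves the remaining multiset; heappush adds an element.  The heap's internal array layout is
-- unobservable in A (only minima and the multiset matter), so the library is ported at that
-- level: the state is the multiset of heap elements, pop removes one occurrence of the minimum.
def pvMinA (s : List Int) : Int := s.min?.getD 0

theorem pvMinA_mem (s : List Int) (h : s ≠ []) : pvMinA s ∈ s := by
  unfold pvMinA
  cases hm : s.min? with
  | none => exact absurd (List.min?_eq_none_iff.mp hm) h
  | some m => simpa using List.min?_mem hm

theorem length_erase_minA (s : List Int) (h : s ≠ []) :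
    (s.erase (pvMinA s)).length = s.length - 1 :=
  List.length_erase_of_mem (pvMinA_mem s h)

def loopA (s : List Int) (K answer : Int) : Int :=
  if h : 1 < s.length then
    if K ≤ pvMinA s then answer
    else
      loopA (((s.erase (pvMinA s)).erase (pvMinA (s.erase (pvMinA s)))) ++
        [pvMinA s + pvMinA (s.erase (pvMinA s)) * 2]) K (answer + 1)
  else
    match s with
    | [] => 0          -- unreachable under Pre_solution (Python raises IndexError on [])
    | x :: _ => if x < K then -1 else answer
termination_by s.length
decreasing_by
  have h1 : s ≠ [] := by intro hs; simp [hs] at h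
  have e1 : (s.erase (pvMinA s)).length = s.length - 1 := length_erase_minA s h1
  have h2 : s.erase (pvMinA s) ≠ [] := by
    intro hs; rw [hs] at e1; simp at e1; omega
  have e2 := length_erase_minA (s.erase (pvMinA s)) h2
  simp only [List.length_append, List.length_cons, List.length_nil]
  omega

def solution (scoville : List Int) (K : Int) : Int :=
  loopA scoville K 0

-- ===== PORT B =====
-- _front(base, i, mixed, j): the smaller of the two queue fronts (base branch when mixed is
-- exhausted or base's front is ≤).  The consumed prefixes base[:i], mixed[:j] are irrelevant,
-- so the port carries the remaining suffixes of the two queues directly.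
def frontB : List Int → List Int → Int
  | bq, [] => bq.headD 0       -- base[i]; out of range only when both queues are empty,
                               -- which Python reaches only on [] (excluded by Pre_solution)
  | [], m :: _ => m
  | b :: _, m :: _ => if b ≤ m then b else m

-- _take(base, i, mixed, j): pop the smaller front, same guard as _front
def takeB : List Int → List Int → Int × List Int × List Int
  | bq, [] => (bq.headD 0, bq.tail, [])
  | [], m :: mt => (m, [], mt)
  | b :: bt, m :: mt => if b ≤ m then (b, bt, m :: mt) else (m, b :: bt, mt)

theorem takeB_length (bq mq : List Int) (h : bq ++ mq ≠ []) :
    (takeB bq mq).2.1.length + (takeB bq mq).2.2.length + 1 = bq.length + mq.length := by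
  match bq, mq with
  | [], [] => simp at h
  | b :: bt, [] => simp [takeB]
  | [], m :: mt => simp [takeB]
  | b :: bt, m :: mt => by_cases hbm : b ≤ m <;> simp [takeB, hbm] <;> omega

def loopB (bq mq : List Int) (K ans : Int) : Int :=
  if h : 1 < bq.length + mq.length then
    if K ≤ frontB bq mq then ans
    else
      loopB (takeB (takeB bq mq).2.1 (takeB bq mq).2.2).2.1
        ((takeB (takeB bq mq).2.1 (takeB bq mq).2.2).2.2 ++
          [(takeB bq mq).1 + 2 * (takeB (takeB bq mq).2.1 (takeB bq mq).2.2).1])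
        K (ans + 1)
  else
    if frontB bq mq < K then -1 else ans
termination_by bq.length + mq.length
decreasing_by
  have h1 : bq ++ mq ≠ [] := by
    intro he
    have := congrArg List.length he
    simp only [List.length_append, List.length_nil] at this
    omega
  have e1 := takeB_length bq mq h1
  have h2 : (takeB bq mq).2.1 ++ (takeB bq mq).2.2 ≠ [] := by
    intro he
    have := congrArg List.length he
    simp only [List.length_append, List.length_nil] at this
    omega
  have e2 := takeB_length _ _ h2
  simp only [List.length_append, List.length_cons, List.length_nil]
  omega

def solution_alt (scoville : List Int) (K : Int) : Int :=
  loopB (PySem.List.sorted scoville (fun x => x) false) [] K 0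

-- ===== PRECONDITION & SPEC =====
-- Pre_ excludes only the empty list, on which both Pythons raise IndexError.
def Pre_solution (scoville : List Int) (K : Int) : Prop := scoville ≠ []
instance (scoville : List Int) (K : Int) : Decidable (Pre_solution scoville K) := by
  unfold Pre_solution; infer_instance
def pvWitness_solution : List Int × Int := ([1, 2, 3, 9, 10, 12], 7)
def Spec_solution (scoville : List Int) (K : Int) (out : Int) : Prop := out = solution_alt scoville K
instance (scoville : List Int) (K : Int) (out : Int) : Decidable (Spec_solution scoville K out) := by
  unfold Spec_solution; infer_instance

-- ===== CLAIM (what is proved, stated in full; the proofs are below) =====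
def Claim_equal_solution : Prop := ∀ (scoville : List Int) (K : Int), Dom_solution scoville K → Pre_solution scoville K → Spec_solution scoville K (solution scoville K)

-- ===== LEMMAS AND PROOFS =====

theorem pvMinA_eq (s : List Int) (v : Int) (l : List Int)
    (hp : s.Perm (v :: l)) (hv : ∀ x ∈ l, v ≤ x) : pvMinA s = v := by
  have hmin : s.min? = some v := by
    rw [List.min?_eq_some_iff]
    constructor
    · exact hp.mem_iff.mpr List.mem_cons_self
    · intro x hx
      rcases List.mem_cons.mp (hp.mem_iff.mp hx) with h | h
      · simp [h]
      · exact hv x h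
  simp [pvMinA, hmin]

theorem erase_perm_of_perm_cons (s : List Int) (a : Int) (rest : List Int)
    (hp : s.Perm (a :: rest)) : (s.erase a).Perm rest := by
  have := hp.erase a
  simpa using this

-- factoring a concatenation ending in a known last element
theorem concat_factor (l1 l2 l3 : List Int) (x : Int)
    (h : l1 ++ l2 = l3 ++ [x]) (h2 : l2 ≠ []) :
    ∃ q, l2 = q ++ [x] ∧ l3 = l1 ++ q := by
  induction l1 generalizing l3 with
  | nil => exact ⟨l3, by simpa using h, by simp⟩
  | cons a l1' ih =>
    match l3, h with
    | [], h =>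
      simp at h
      exact absurd h.2.2 h2
    | c :: l3', h =>
      simp at h
      obtain ⟨hac, h⟩ := h
      obtain ⟨q, hq1, hq2⟩ := ih l3' h
      exact ⟨q, hq1, by simp [hac, hq2]⟩

theorem mem_le_of_concat_sorted (q : List Int) (f y : Int)
    (hs : (q ++ [f]).Pairwise (· ≤ ·)) (hy : y ∈ q ++ [f]) : y ≤ f := by
  rcases List.mem_append.mp hy with h | h
  · exact (List.pairwise_append.mp hs).2.2 y h f (by simp)
  · simp at h; omega

theorem takeB_spec (bq mq : List Int) (hne : bq ++ mq ≠ [])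
    (hsb : bq.Pairwise (· ≤ ·)) (hsm : mq.Pairwise (· ≤ ·)) :
    (takeB bq mq).1 = frontB bq mq ∧
    (bq ++ mq).Perm ((takeB bq mq).1 :: ((takeB bq mq).2.1 ++ (takeB bq mq).2.2)) ∧
    (takeB bq mq).2.1.Pairwise (· ≤ ·) ∧
    (takeB bq mq).2.2.Pairwise (· ≤ ·) ∧
    (∀ x ∈ (takeB bq mq).2.1 ++ (takeB bq mq).2.2, (takeB bq mq).1 ≤ x) ∧
    ((takeB bq mq).2.1 <:+ bq) ∧
    ((takeB bq mq).2.2 ≠ [] →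
      ∃ p, mq = p ++ (takeB bq mq).2.2 ∧ ((takeB bq mq).1 ∈ bq ∨ (takeB bq mq).1 ∈ p)) := by
  match bq, mq with
  | [], [] => simp at hne
  | b :: bt, [] =>
    obtain ⟨hb, hbt⟩ := List.pairwise_cons.mp hsb
    refine ⟨rfl, by simp [takeB], hbt, by simp [takeB], ?_, ?_, ?_⟩
    · intro x hx
      simp only [takeB] at hx ⊢
      simp at hx
      exact hb x hx
    · simpa [takeB] using List.suffix_cons b bt
    · intro h; simp [takeB] at h
  | [], m :: mt =>
    obtain ⟨hm, hmt⟩ := List.pairwise_cons.mp hsm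
    refine ⟨rfl, by simp [takeB], by simp [takeB], hmt, ?_, by simp [takeB], ?_⟩
    · intro x hx
      simp only [takeB] at hx ⊢
      simp at hx
      exact hm x hx
    · intro _
      exact ⟨[m], by simp [takeB], Or.inr (by simp [takeB])⟩
  | b :: bt, m :: mt =>
    obtain ⟨hb, hbt⟩ := List.pairwise_cons.mp hsb
    obtain ⟨hm, hmt⟩ := List.pairwise_cons.mp hsm
    by_cases hbm : b ≤ m
    · refine ⟨by simp [takeB, frontB, hbm], by simp [takeB, hbm], by simp [takeB, hbm, hbt],
        by simpa [takeB, hbm] using hsm, ?_, ?_, ?_⟩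
      · intro x hx
        simp only [takeB, if_pos hbm] at hx ⊢
        simp at hx
        rcases hx with h | h | h
        · exact hb x h
        · omega
        · exact le_trans hbm (hm x h)
      · simpa [takeB, hbm] using List.suffix_cons b bt
      · intro _
        exact ⟨[], by simp [takeB, hbm], Or.inl (by simp [takeB, hbm])⟩
    · refine ⟨by simp [takeB, frontB, hbm], ?_, by simpa [takeB, hbm] using hsb,
        by simpa [takeB, hbm] using hmt, ?_, ?_, ?_⟩
      · simpa [takeB, hbm] using (List.perm_middle (a := m) (l₁ := b :: bt) (l₂ := mt))
      · intro x hx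
        simp only [takeB, if_neg hbm] at hx ⊢
        simp at hx
        rcases hx with h | h | h
        · omega
        · have := hb x h; omega
        · exact hm x h
      · simp [takeB, hbm]
      · intro _
        exact ⟨[m], by simp [takeB, hbm], Or.inr (by simp [takeB, hbm])⟩

theorem loop_eq (n : Nat) : ∀ (s bq mq : List Int) (K ans : Int), s.length = n →
    s.Perm (bq ++ mq) → bq.Pairwise (· ≤ ·) → mq.Pairwise (· ≤ ·) →
    (mq = [] ∨ ∃ a0 b0 p, a0 ≤ b0 ∧ mq = p ++ [a0 + 2 * b0] ∧ ∀ x ∈ bq ++ p, b0 ≤ x) →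
    bq ++ mq ≠ [] →
    loopA s K ans = loopB bq mq K ans := by
  induction n using Nat.strong_induction_on with
  | _ n ih =>
    intro s bq mq K ans hlen hp hsb hsm hinv hne
    have hlq : bq.length + mq.length = s.length := by
      have := hp.length_eq.symm
      simpa using this
    by_cases htot : 1 < bq.length + mq.length
    · -- at least two elements remain
      have hs2 : 1 < s.length := by omega
      obtain ⟨hf1, hperm1, hsb1, hsm1, hall1, hsfb1, hsfm1⟩ := takeB_spec bq mq hne hsb hsm
      have hlen1 : (takeB bq mq).2.1.length + (takeB bq mq).2.2.length + 1
          = bq.length + mq.length := takeB_length bq mq hne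
      have hne1 : (takeB bq mq).2.1 ++ (takeB bq mq).2.2 ≠ [] := by
        intro he
        have := congrArg List.length he
        simp only [List.length_append, List.length_nil] at this
        omega
      obtain ⟨hf2, hperm2, hsb2, hsm2, hall2, hsfb2, hsfm2⟩ :=
        takeB_spec (takeB bq mq).2.1 (takeB bq mq).2.2 hne1 hsb1 hsm1
      set a := (takeB bq mq).1 with ha
      set b1 := (takeB bq mq).2.1 with hb1
      set m1 := (takeB bq mq).2.2 with hm1
      set b := (takeB b1 m1).1 with hbv
      set b2 := (takeB b1 m1).2.1 with hb2
      set m2 := (takeB b1 m1).2.2 with hm2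
      have hmina : pvMinA s = a := pvMinA_eq s a (b1 ++ m1) (hp.trans hperm1) hall1
      rw [loopA, loopB, dif_pos hs2, dif_pos htot, hmina, ← hf1, ← ha]
      by_cases hK : K ≤ a
      · rw [if_pos hK, if_pos hK]
      · rw [if_neg hK, if_neg hK]
        have hpe1 : (s.erase a).Perm (b1 ++ m1) :=
          erase_perm_of_perm_cons s a (b1 ++ m1) (hp.trans hperm1)
        have hminb : pvMinA (s.erase a) = b :=
          pvMinA_eq (s.erase a) b (b2 ++ m2) (hpe1.trans hperm2) hall2
        rw [hminb]
        have hbmem : b ∈ b1 ++ m1 := hperm2.mem_iff.mpr List.mem_cons_self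
        have hab : a ≤ b := hall1 b hbmem
        have hpe2 : ((s.erase a).erase b).Perm (b2 ++ m2) :=
          erase_perm_of_perm_cons _ b (b2 ++ m2) (hpe1.trans hperm2)
        have hfood : a + b * 2 = a + 2 * b := by ring
        have hpermS : (((s.erase a).erase b) ++ [a + b * 2]).Perm (b2 ++ (m2 ++ [a + 2 * b])) := by
          rw [hfood, ← List.append_assoc]
          exact hpe2.append_right _
        -- sortedness of the new mixed queue
        have hsmNew : (m2 ++ [a + 2 * b]).Pairwise (· ≤ ·) := by
          rcases eq_or_ne m2 [] with h0 | h0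
          · rw [h0]; simp
          · obtain ⟨p2, hm1eq, hbsrc⟩ := hsfm2 h0
            have hm1ne : m1 ≠ [] := by
              intro h; rw [h] at hm1eq
              exact h0 (List.append_eq_nil_iff.mp hm1eq.symm).2
            obtain ⟨p1, hmqeq, hasrc⟩ := hsfm1 hm1ne
            have hmqne : mq ≠ [] := by
              intro h; rw [h] at hmqeq
              exact hm1ne (List.append_eq_nil_iff.mp hmqeq.symm).2
            rcases hinv with h | ⟨a0, b0, p, hab0, hmq0, hb0⟩
            · exact absurd h hmqne
            have he : (p1 ++ p2) ++ m2 = p ++ [a0 + 2 * b0] := by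
              rw [List.append_assoc, ← hm1eq, ← hmqeq, hmq0]
            obtain ⟨q, hm2eq, hpeq⟩ := concat_factor (p1 ++ p2) m2 p (a0 + 2 * b0) he h0
            have hb0a : b0 ≤ a := by
              rcases hasrc with h | h
              · exact hb0 a (List.mem_append_left _ h)
              · have hap : a ∈ p := by
                  rw [hpeq]
                  exact List.mem_append_left _ (List.mem_append_left _ h)
                exact hb0 a (List.mem_append_right _ hap)
            have hb0b : b0 ≤ b := by
              rcases hbsrc with h | h
              · exact hb0 b (List.mem_append_left _ (hsfb1.subset h))
              · have hbp : b ∈ p := by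
                  rw [hpeq]
                  exact List.mem_append_left _ (List.mem_append_right _ h)
                exact hb0 b (List.mem_append_right _ hbp)
            rw [List.pairwise_append]
            refine ⟨hsm2, by simp, ?_⟩
            intro y hy z hz
            simp at hz; subst hz
            have hyf : y ≤ a0 + 2 * b0 :=
              mem_le_of_concat_sorted q (a0 + 2 * b0) y (hm2eq ▸ hsm2) (hm2eq ▸ hy)
            omega
        have hneNew : b2 ++ (m2 ++ [a + 2 * b]) ≠ [] := by simp
        -- length bookkeeping
        have hamem : a ∈ s := (hp.trans hperm1).mem_iff.mpr List.mem_cons_self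
        have hbmem' : b ∈ s.erase a := (hpe1.trans hperm2).mem_iff.mpr List.mem_cons_self
        have e1 := List.length_erase_of_mem hamem
        have e2 := List.length_erase_of_mem hbmem'
        have hlt : (((s.erase a).erase b) ++ [a + b * 2]).length < n := by
          simp only [List.length_append, List.length_cons, List.length_nil]
          omega
        exact ih _ hlt _ _ _ K (ans + 1) rfl hpermS hsb2 hsmNew
          (Or.inr ⟨a, b, m2, hab, rfl, hall2⟩) hneNew
    · -- exactly one element remains
      have hone : bq.length + mq.length = 1 := by
        have : bq ++ mq ≠ [] := hne
        have hpos : 0 < (bq ++ mq).length := List.length_pos_iff.mpr this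
        simp only [List.length_append] at hpos
        omega
      have hs1 : s.length = 1 := by omega
      obtain ⟨x, hx⟩ := List.length_eq_one_iff.mp hs1
      subst hx
      have hq : bq ++ mq = [x] := List.perm_singleton.mp hp.symm |>.symm ▸ rfl
      rw [loopA, loopB, dif_neg (show ¬ 1 < [x].length by simp), dif_neg htot]
      have hfx : frontB bq mq = x := by
        match bq, mq, hq with
        | [], m :: mt, hq => simp at hq; simp [frontB, hq.1]
        | bb :: bt, mq, hq =>
          simp at hq
          obtain ⟨hbx, hbt, hmq⟩ := hq
          subst hbx; subst hbt; subst hmq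
          simp [frontB]
      rw [hfx]

-- ===== VERDICT (by name: the statement is the Claim_ definition above) =====
theorem solution_spec : Claim_equal_solution := by
  intro scoville K _ hpre
  unfold Spec_solution solution solution_alt
  have hperm : scoville.Perm (PySem.List.sorted scoville (fun x => x) false ++ []) := by
    simpa using (PySem.List.sorted_perm scoville (fun x => x) false).symm
  have hsort : (PySem.List.sorted scoville (fun x => x) false).Pairwise (· ≤ ·) :=
    PySem.List.sorted_pairwise scoville (fun x => x)
  have hne : PySem.List.sorted scoville (fun x => x) false ++ [] ≠ [] := by
    intro h
    have := hperm.length_eq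
    rw [h] at this
    simp at this
    exact hpre this
  exact loop_eq scoville.length scoville _ [] K 0 rfl hperm hsort (by simp) (Or.inl rfl) hne
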